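-- pv_equiv track=rewrite | github.com/Anshidtp/Engage_AI | app/services/linkedin_agent.py | _clean_post_content
-- ===== SOURCE A (Python) =====
-- def _clean_post_content(content: str) -> str:
--     """Clean up the generated post content."""
--     lines = content.split('\n')
--     cleaned_lines = []
--
--     for line in lines:
--         # Remove hashtag-only lines (they'll be handled separately)
--         if line.strip() and not line.strip().startswith('#'):
--             cleaned_lines.append(line)
--         elif line.strip().startswith('#'):
--             # Stop processing when we hit hashtags
--             break
--
--     return '\n'.join(cleaned_lines).strip()
-- ===== SOURCE B (Python) =====
-- def _clean_post_content(content: str) -> str: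
--     """Clean up the generated post content."""
--     # Character-level state machine: one pass over the raw string, no split/join.
--     out = []          # chars of the result built so far
--     line = []         # chars of the current (unfinished) line
--     significant = False  # current line has a non-whitespace char (and did not start with '#')
--     for ch in content:
--         if ch == '\n':
--             if significant:
--                 if out:
--                     out.append('\n')
--                 out.extend(line)
--             line = []
--             significant = False
--         else:
--             line.append(ch)
--             if not ch.isspace():
--                 if not significant and ch == '#':
--                     # first non-whitespace char of a line is '#': stop entirely
--                     return ''.join(out).strip()
--                 significant = True
--     if significant:
--         if out:
--             out.append('\n')
--         out.extend(line)
--     return ''.join(out).strip()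
-- ===== Notes on version B (the rewrite author's own statement) =====
-- stated objective: alternative
-- what changed: B replaces A's line-oriented loop (split on newline, per-line strip tests, append, join) by a single character-level state machine over the raw string that builds the output directly and returns early at the first hash character that starts a line.
import Mathlib
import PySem

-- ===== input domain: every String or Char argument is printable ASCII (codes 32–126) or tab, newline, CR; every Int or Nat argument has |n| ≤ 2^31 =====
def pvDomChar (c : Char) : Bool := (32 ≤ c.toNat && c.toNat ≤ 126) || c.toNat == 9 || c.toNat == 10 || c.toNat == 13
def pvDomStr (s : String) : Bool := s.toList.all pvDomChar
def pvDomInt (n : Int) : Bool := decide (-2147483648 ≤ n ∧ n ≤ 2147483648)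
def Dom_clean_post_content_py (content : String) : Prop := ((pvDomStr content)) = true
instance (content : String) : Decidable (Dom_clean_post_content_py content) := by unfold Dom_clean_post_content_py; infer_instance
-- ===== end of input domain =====

-- B replaces A's line loop (split, per-line strip tests, join) by a single character-level
-- state machine over the raw string: an alternative decomposition, same cost.

-- ===== PORT A =====
-- the for-loop with break, over the remaining lines, carrying the accumulator
def pvLoopA : List (List Char) → List (List Char) → List (List Char)
  | [], acc => acc
  | l :: rest, acc =>
    if PySem.Chars.strip l ≠ [] ∧ PySem.Chars.startswith (PySem.Chars.strip l) ['#'] = false then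
      pvLoopA rest (acc ++ [l])
    else if PySem.Chars.startswith (PySem.Chars.strip l) ['#'] = true then
      acc
    else
      pvLoopA rest acc

def clean_post_content_py (content : String) : String :=
  String.ofList (PySem.Chars.strip (PySem.Chars.join ['\n']
    (pvLoopA (PySem.Chars.splitOn content.toList ['\n']) [])))

-- ===== PORT B =====
-- Source B's character-level state machine: out = result chars so far, line = current line chars,
-- sig = current line has a non-whitespace char (and did not start with '#')
def pvGoB : List Char → List Char → List Char → Bool → List Char
  | [], out, line, sig =>
      if sig then (if out ≠ [] then out ++ '\n' :: line else line) else out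
  | c :: rest, out, line, sig =>
      if c = '\n' then
        pvGoB rest (if sig then (if out ≠ [] then out ++ '\n' :: line else line) else out) [] false
      else if PySem.Chars.isspace c then
        pvGoB rest out (line ++ [c]) sig
      else if sig = false ∧ c = '#' then
        out   -- early return ''.join(out).strip(): the final strip is applied by the caller below
      else
        pvGoB rest out (line ++ [c]) true

def clean_post_content_py_alt (content : String) : String :=
  String.ofList (PySem.Chars.strip (pvGoB content.toList [] [] false))

-- ===== PRECONDITION & SPEC =====
def Spec_clean_post_content_py (content : String) (out : String) : Prop := out = clean_post_content_py_alt content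
instance (content : String) (out : String) : Decidable (Spec_clean_post_content_py content out) := by unfold Spec_clean_post_content_py; infer_instance

-- ===== CLAIM (what is proved, stated in full; the proofs are below) =====
def Claim_equal_clean_post_content_py : Prop := ∀ (content : String), Dom_clean_post_content_py content → Spec_clean_post_content_py content (clean_post_content_py content)

-- ===== LEMMAS AND PROOFS =====

-- structural version of split('\n')
def pvConsFirst (a : List Char) : List (List Char) → List (List Char)
  | [] => [a]
  | l :: r => (a ++ l) :: r

def pvSplit : List Char → List (List Char)
  | [] => [[]]
  | c :: cs => if c = '\n' then [] :: pvSplit cs else pvConsFirst [c] (pvSplit cs)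

theorem pvSplit_ne_nil (cs : List Char) : pvSplit cs ≠ [] := by
  cases cs with
  | nil => simp [pvSplit]
  | cons c cs =>
    simp only [pvSplit]
    split
    · simp
    · cases h : pvSplit cs <;> simp [pvConsFirst, h]

theorem pvConsFirst_nil (ls : List (List Char)) (h : ls ≠ []) : pvConsFirst [] ls = ls := by
  cases ls with
  | nil => exact absurd rfl h
  | cons l r => simp [pvConsFirst]

theorem pvConsFirst_consFirst (a b : List Char) (ls : List (List Char)) :
    pvConsFirst a (pvConsFirst b ls) = pvConsFirst (a ++ b) ls := by
  cases ls <;> simp [pvConsFirst]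

theorem pvGo_spec (fuel : Nat) : ∀ (l cur : List Char) (acc : List (List Char)),
    l.length < fuel →
    PySem.Chars.splitOn.go ['\n'] fuel l cur acc = acc.reverse ++ pvConsFirst cur.reverse (pvSplit l) := by
  induction fuel with
  | zero => intro l cur acc h; omega
  | succ fuel ih =>
    intro l cur acc h
    cases l with
    | nil => simp [PySem.Chars.splitOn.go, pvSplit, pvConsFirst]
    | cons c rest =>
      simp only [PySem.Chars.splitOn.go, pvSplit]
      by_cases hc : c = '\n'
      · rw [if_pos (by simp [hc, List.isPrefixOf]), if_pos hc]
        rw [show List.drop (['\n'] : List Char).length (c :: rest) = rest from by simp]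
        rw [ih rest [] (cur.reverse :: acc) (by simpa using Nat.lt_of_succ_lt_succ h)]
        cases hps : pvSplit rest with
        | nil => exact absurd hps (pvSplit_ne_nil rest)
        | cons a b => simp [pvConsFirst]
      · rw [if_neg (by simp only [List.isPrefixOf, Bool.and_eq_true, beq_iff_eq]; exact fun h => hc h.1.symm), if_neg hc]
        rw [ih rest (c :: cur) acc (by simpa using Nat.lt_of_succ_lt_succ h)]
        rw [pvConsFirst_consFirst]
        simp

theorem pvSplitOn_eq (cs : List Char) : PySem.Chars.splitOn cs ['\n'] = pvSplit cs := by
  unfold PySem.Chars.splitOn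
  rw [pvGo_spec (cs.length + 1) cs [] [] (by omega)]
  simp [pvConsFirst_nil _ (pvSplit_ne_nil cs)]

-- A's loop with the accumulator already joined with '\n'
def pvEmit : List (List Char) → List Char → List Char
  | [], out => out
  | l :: rest, out =>
    if PySem.Chars.strip l ≠ [] ∧ PySem.Chars.startswith (PySem.Chars.strip l) ['#'] = false then
      pvEmit rest (if out ≠ [] then out ++ '\n' :: l else l)
    else if PySem.Chars.startswith (PySem.Chars.strip l) ['#'] = true then out
    else pvEmit rest out

theorem pvJoin_ne_nil (acc : List (List Char)) (hm : ∀ m ∈ acc, m ≠ []) (h : acc ≠ []) :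
    PySem.Chars.join ['\n'] acc ≠ [] := by
  cases acc with
  | nil => exact absurd rfl h
  | cons a acc' =>
    cases acc' with
    | nil => simpa [PySem.Chars.join_singleton] using hm a (by simp)
    | cons b r =>
      rw [PySem.Chars.join_cons_cons]
      have := hm a (by simp)
      cases a with
      | nil => exact absurd rfl this
      | cons x xs => simp

theorem pvJoin_append (acc : List (List Char)) (l : List Char) (hm : ∀ m ∈ acc, m ≠ []) :
    PySem.Chars.join ['\n'] (acc ++ [l]) =
      (if PySem.Chars.join ['\n'] acc ≠ [] then PySem.Chars.join ['\n'] acc ++ '\n' :: l else l) := by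
  induction acc with
  | nil => simp [PySem.Chars.join_nil, PySem.Chars.join_singleton]
  | cons a acc' ih =>
    have ha : a ≠ [] := hm a (by simp)
    cases acc' with
    | nil =>
      rw [if_pos (pvJoin_ne_nil [a] hm (by simp))]
      simp [PySem.Chars.join_singleton, PySem.Chars.join_cons_cons]
    | cons b r =>
      rw [if_pos (pvJoin_ne_nil (a :: b :: r) hm (by simp))]
      have hbr : ∀ m ∈ (b :: r), m ≠ [] := fun m hmm => hm m (by simp [hmm])
      rw [show (a :: b :: r) ++ [l] = a :: b :: (r ++ [l]) by simp]
      conv_lhs => rw [PySem.Chars.join_cons_cons]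
      rw [show (b :: (r ++ [l]) : List (List Char)) = (b :: r) ++ [l] by simp]
      rw [ih hbr, if_pos (pvJoin_ne_nil (b :: r) hbr (by simp))]
      conv_rhs => rw [PySem.Chars.join_cons_cons]
      simp

theorem pvLoopA_emit (ls : List (List Char)) : ∀ (acc : List (List Char)),
    (∀ m ∈ acc, m ≠ []) →
    PySem.Chars.join ['\n'] (pvLoopA ls acc) = pvEmit ls (PySem.Chars.join ['\n'] acc) := by
  induction ls with
  | nil => intro acc _; simp [pvLoopA, pvEmit]
  | cons l rest ih =>
    intro acc hm
    by_cases h2 : PySem.Chars.startswith (PySem.Chars.strip l) ['#'] = true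
    · have h1 : ¬(PySem.Chars.strip l ≠ [] ∧ PySem.Chars.startswith (PySem.Chars.strip l) ['#'] = false) := by
        simp [h2]
      simp only [pvLoopA, pvEmit, if_neg h1, if_pos h2]
    · by_cases hb : PySem.Chars.strip l = []
      · have h1 : ¬(PySem.Chars.strip l ≠ [] ∧ PySem.Chars.startswith (PySem.Chars.strip l) ['#'] = false) := by
          simp [hb]
        simp only [pvLoopA, pvEmit, if_neg h1, if_neg h2]
        exact ih acc hm
      · have h1 : PySem.Chars.strip l ≠ [] ∧ PySem.Chars.startswith (PySem.Chars.strip l) ['#'] = false :=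
          ⟨hb, by simpa using h2⟩
        have hl : l ≠ [] := by
          intro he; subst he; exact hb rfl
        simp only [pvLoopA, pvEmit, if_pos h1]
        rw [ih (acc ++ [l]) (by
          intro m hmm
          rcases List.mem_append.mp hmm with h | h
          · exact hm m h
          · simpa using (List.mem_singleton.mp h ▸ hl))]
        rw [pvJoin_append acc l hm]

-- facts about lstrip / rstrip / strip used by the state-machine invariant
theorem pvRstrip_cons (d : Char) (f : List Char) (hd : PySem.Chars.isspace d = false) :
    PySem.Chars.rstrip (d :: f) = d :: PySem.Chars.rstrip f := by
  unfold PySem.Chars.rstrip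
  rw [show (d :: f).reverse = f.reverse ++ [d] by simp]
  rw [List.dropWhile_append]
  by_cases he : (List.dropWhile PySem.Chars.isspace f.reverse).isEmpty
  · rw [if_pos he]
    simp only [List.isEmpty_iff] at he
    simp [he, List.dropWhile, hd]
  · rw [if_neg he]
    simp

theorem pvStrip_of_lstrip_nil (line : List Char) (h : PySem.Chars.lstrip line = []) :
    PySem.Chars.strip line = [] := by
  unfold PySem.Chars.strip
  rw [h]; rfl

theorem pvStrip_of_lstrip_cons (line : List Char) (d : Char) (f : List Char)
    (h : PySem.Chars.lstrip line = d :: f) (hd : PySem.Chars.isspace d = false) :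
    PySem.Chars.strip line = d :: PySem.Chars.rstrip f := by
  unfold PySem.Chars.strip
  rw [h, pvRstrip_cons d f hd]

theorem pvLstrip_append_one (line : List Char) (c : Char) :
    PySem.Chars.lstrip (line ++ [c]) =
      (if PySem.Chars.lstrip line = [] then (if PySem.Chars.isspace c then [] else [c])
       else PySem.Chars.lstrip line ++ [c]) := by
  unfold PySem.Chars.lstrip
  rw [List.dropWhile_append]
  by_cases he : (List.dropWhile PySem.Chars.isspace line).isEmpty
  · simp only [List.isEmpty_iff] at he
    rw [if_pos (by simp [he]), if_pos he]
    by_cases hc : PySem.Chars.isspace c <;> simp [List.dropWhile, hc]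
  · simp only [List.isEmpty_iff] at he
    rw [if_neg (by simpa using he), if_neg he]

theorem pvStartswith_hash (d : Char) (f : List Char) :
    PySem.Chars.startswith (d :: f) ['#'] = (d == '#') := by
  simp [PySem.Chars.startswith, List.isPrefixOf, eq_comm]

-- the state-machine invariant: pvGoB computes pvEmit of the remaining lines
theorem pvGoB_emit (cs : List Char) : ∀ (out line : List Char) (sig : Bool),
    (if sig then ∃ d f, PySem.Chars.lstrip line = d :: f ∧ PySem.Chars.isspace d = false ∧ d ≠ '#'
     else PySem.Chars.lstrip line = []) →
    pvGoB cs out line sig = pvEmit (pvConsFirst line (pvSplit cs)) out := by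
  induction cs with
  | nil =>
    intro out line sig hinv
    cases sig with
    | false =>
      simp only [if_neg (Bool.false_ne_true)] at hinv
      have hs := pvStrip_of_lstrip_nil line hinv
      simp [pvGoB, pvSplit, pvConsFirst, pvEmit, hs, PySem.Chars.startswith]
    | true =>
      simp only [Bool.true_eq, if_true] at hinv
      obtain ⟨d, f, h1, h2, h3⟩ := hinv
      have hs := pvStrip_of_lstrip_cons line d f h1 h2
      simp [pvGoB, pvSplit, pvConsFirst, pvEmit, hs, pvStartswith_hash, h3]
  | cons c rest ih =>
    intro out line sig hinv
    by_cases hc : c = '\n'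
    · subst hc
      simp only [pvGoB, pvSplit, if_pos rfl]
      rw [ih _ [] false (by simp [PySem.Chars.lstrip, List.dropWhile])]
      rw [pvConsFirst_nil _ (pvSplit_ne_nil rest)]
      cases hps : pvSplit rest with
      | nil => exact absurd hps (pvSplit_ne_nil rest)
      | cons f1 tl =>
        cases sig with
        | false =>
          simp only [if_neg (Bool.false_ne_true)] at hinv
          have hs := pvStrip_of_lstrip_nil line hinv
          simp [pvConsFirst, pvEmit, hs, PySem.Chars.startswith, List.isPrefixOf]
        | true =>
          simp only [if_pos rfl] at hinv
          obtain ⟨d, f, h1, h2, h3⟩ := hinv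
          have hs := pvStrip_of_lstrip_cons line d f h1 h2
          simp [pvConsFirst, pvEmit, hs, pvStartswith_hash, h3]
    · have hsplit : pvConsFirst line (pvSplit (c :: rest)) = pvConsFirst (line ++ [c]) (pvSplit rest) := by
        simp only [pvSplit, if_neg hc, pvConsFirst_consFirst]
      by_cases hws : PySem.Chars.isspace c = true
      · -- whitespace: extend the line, state unchanged
        simp only [pvGoB, if_neg hc, if_pos hws, hsplit]
        apply ih
        cases sig with
        | false =>
          simp only [if_neg (Bool.false_ne_true)] at hinv ⊢
          rw [pvLstrip_append_one, if_pos hinv, if_pos hws]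
        | true =>
          simp only [Bool.true_eq] at hinv ⊢
          obtain ⟨d, f, h1, h2, h3⟩ := hinv
          exact ⟨d, f ++ [c], by rw [pvLstrip_append_one, if_neg (by simp [h1]), h1]; simp, h2, h3⟩
      · by_cases hh : sig = false ∧ c = '#'
        · -- hashtag start: early return
          obtain ⟨hsig, hch⟩ := hh
          subst hsig
          simp only [pvGoB, if_neg hc, hsplit]
          rw [if_neg hws, if_pos (by simp [hch])]
          simp only [if_neg (Bool.false_ne_true)] at hinv
          cases hps : pvSplit rest with
          | nil => exact absurd hps (pvSplit_ne_nil rest)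
          | cons f1 tl =>
            have hl : PySem.Chars.lstrip ((line ++ [c]) ++ f1) = c :: f1 := by
              unfold PySem.Chars.lstrip at hinv ⊢
              rw [List.append_assoc, List.dropWhile_append, if_pos (by simp [hinv])]
              simp [hws]
            have hs := pvStrip_of_lstrip_cons _ c f1 hl (by simpa using hws)
            rw [List.append_assoc, List.singleton_append] at hs
            subst hch
            simp [pvConsFirst, pvEmit, hs, pvStartswith_hash]
        · -- ordinary character: extend the line, sig := true
          simp only [pvGoB, if_neg hc, hsplit]
          rw [if_neg hws, if_neg hh]
          apply ih
          simp only [if_pos]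
          cases sig with
          | false =>
            simp only [if_neg (Bool.false_ne_true)] at hinv
            have hch : c ≠ '#' := fun he => hh ⟨rfl, he⟩
            exact ⟨c, [], by rw [pvLstrip_append_one, if_pos hinv, if_neg (by simp [hws])],
              by simp [hws], hch⟩
          | true =>
            simp only [if_pos rfl] at hinv
            obtain ⟨d, f, h1, h2, h3⟩ := hinv
            exact ⟨d, f ++ [c], by rw [pvLstrip_append_one, if_neg (by simp [h1]), h1]; simp, h2, h3⟩

-- ===== VERDICT (by name: the statement is the Claim_ definition above) =====
theorem clean_post_content_py_spec : Claim_equal_clean_post_content_py := by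
  intro content _
  unfold Spec_clean_post_content_py clean_post_content_py clean_post_content_py_alt
  rw [pvLoopA_emit _ [] (by simp), pvSplitOn_eq,
    pvGoB_emit _ [] [] false (by simp [PySem.Chars.lstrip, List.dropWhile]),
    pvConsFirst_nil _ (pvSplit_ne_nil _)]
  rfl
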